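-- pv_equiv track=rewrite | github.com/michalmazgal/remanence-io | verify_core_cpu.py | jump_lcg
-- ===== SOURCE A (Python) =====
-- def jump_lcg(seed, n):
--     """
--     Implements the LCG jump logic to find the n-th state of the PRNG.
--     X_n = (a^n * seed + c * (a^n - 1) / (a - 1)) mod 2^32
--     """
--     a = 1664525
--     c = 1013904223
--     cur_a = a
--     cur_c = c
--     res_a = 1
--     res_c = 0
--     n_val = n
--     while n_val > 0:
--         if n_val & 1:
--             res_a = (res_a * cur_a) & 0xFFFFFFFF
--             res_c = (res_c * cur_a + cur_c) & 0xFFFFFFFF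
--         cur_c = (cur_c * cur_a + cur_c) & 0xFFFFFFFF
--         cur_a = (cur_a * cur_a) & 0xFFFFFFFF
--         n_val >>= 1
--     return (res_a * seed + res_c) & 0xFFFFFFFF
-- ===== SOURCE B (Python) =====
-- def jump_lcg(seed, n):
--     """
--     n-th LCG state by closed form: A = a^n mod 2^32 via pow, and the geometric
--     sum S = (a^n - 1)//(a - 1) recovered mod 2^32 exactly from a^n mod ((a-1)*2^32).
--     """
--     a = 1664525
--     c = 1013904223
--     M = 4294967296
--     if n <= 0:
--         return seed & 0xFFFFFFFF
--     A = pow(a, n, M)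
--     S = (pow(a, n, (a - 1) * M) - 1) // (a - 1)
--     return (A * seed + c * S) & 0xFFFFFFFF
-- ===== Notes on version B (the rewrite author's own statement) =====
-- stated objective: alternative
-- what changed: Replaced the bit-by-bit binary composition of affine maps with a closed form: A = pow(a,n,2^32) and the geometric sum (a^n-1)//(a-1) recovered exactly mod 2^32 from pow(a,n,(a-1)*2^32), then one affine application.
import Mathlib
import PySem

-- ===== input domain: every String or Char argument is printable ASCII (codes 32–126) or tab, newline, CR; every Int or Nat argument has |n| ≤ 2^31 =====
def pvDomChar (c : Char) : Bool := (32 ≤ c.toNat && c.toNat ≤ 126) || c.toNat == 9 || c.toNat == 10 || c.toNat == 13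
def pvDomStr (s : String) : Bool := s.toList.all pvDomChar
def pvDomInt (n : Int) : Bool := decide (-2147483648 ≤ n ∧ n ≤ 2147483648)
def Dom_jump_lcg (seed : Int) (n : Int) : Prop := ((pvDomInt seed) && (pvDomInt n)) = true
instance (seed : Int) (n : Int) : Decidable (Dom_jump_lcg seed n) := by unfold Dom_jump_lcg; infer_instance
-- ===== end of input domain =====

-- B replaces A's bit-by-bit affine-map squaring loop with a direct closed form
-- (modular power and an exactly-recovered geometric sum); alternative algorithm, same results.


-- ===== PORT A =====
-- A's while-loop as structural recursion on n_val (n&1 → band _ 1, >>=1 → >>> 1, & 0xFFFFFFFF → band _ 4294967295)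
def jump_lcg_loop (n_val cur_a cur_c res_a res_c : Int) : Int × Int :=
  if _h : 0 < n_val then
    let p := if PySem.Int.band n_val 1 ≠ 0 then
        (PySem.Int.band (res_a * cur_a) 4294967295,
         PySem.Int.band (res_c * cur_a + cur_c) 4294967295)
      else (res_a, res_c)
    jump_lcg_loop (n_val >>> (1:Nat))
      (PySem.Int.band (cur_a * cur_a) 4294967295)
      (PySem.Int.band (cur_c * cur_a + cur_c) 4294967295) p.1 p.2
  else (res_a, res_c)
termination_by n_val.toNat
decreasing_by
  simp only [Int.shiftRight_eq_div_pow, pow_one]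
  omega

def jump_lcg (seed : Int) (n : Int) : Int :=
  let r := jump_lcg_loop n 1664525 1013904223 1 0
  PySem.Int.band (r.1 * seed + r.2) 4294967295

-- ===== PORT B =====
def jump_lcg_alt (seed : Int) (n : Int) : Int :=
  if n ≤ 0 then PySem.Int.band seed 4294967295
  else
    let bigA := PySem.Int.powMod 1664525 n.toNat 4294967296
    let s := PySem.Int.floordiv
        (PySem.Int.powMod 1664525 n.toNat ((1664525 - 1) * 4294967296) - 1) (1664525 - 1)
    PySem.Int.band (bigA * seed + 1013904223 * s) 4294967295

-- ===== PRECONDITION & SPEC =====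
def Spec_jump_lcg (seed : Int) (n : Int) (out : Int) : Prop := out = jump_lcg_alt seed n
instance (seed : Int) (n : Int) (out : Int) : Decidable (Spec_jump_lcg seed n out) := by unfold Spec_jump_lcg; infer_instance

-- ===== CLAIM (what is proved, stated in full; the proofs are below) =====
def Claim_equal_jump_lcg : Prop := ∀ (seed : Int) (n : Int), Dom_jump_lcg seed n → Spec_jump_lcg seed n (jump_lcg seed n)

-- ===== LEMMAS AND PROOFS =====

-- Python's  x & 0xFFFFFFFF  is  x mod 2^32, for every integer x.
theorem band_mask (a : Int) : PySem.Int.band a 4294967295 = a % 4294967296 := by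
  unfold PySem.Int.band
  by_cases h : 0 ≤ a
  · rw [if_pos h, if_pos (by norm_num)]
    have h1 : (4294967295 : Int).toNat = 2^32 - 1 := rfl
    rw [h1, Nat.and_two_pow_sub_one_eq_mod]
    omega
  · rw [if_neg h, if_pos (by norm_num)]
    have h1 : (4294967295 : Int).toNat = 2^32 - 1 := rfl
    rw [h1, Nat.and_comm, Nat.and_two_pow_sub_one_eq_mod]
    omega

theorem band_modeq (a : Int) : PySem.Int.band a 4294967295 ≡ a [ZMOD 4294967296] := by
  rw [band_mask]
  exact Int.emod_emod_of_dvd a dvd_rfl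

-- geometric sum  ∑_{i<m} x^i
def G (x : Int) (m : Nat) : Int := ∑ i ∈ Finset.range m, x ^ i

theorem G_modeq {x y : Int} (h : x ≡ y [ZMOD 4294967296]) (m : Nat) :
    G x m ≡ G y m [ZMOD 4294967296] := by
  induction m with
  | zero => rfl
  | succ k ih =>
    simp only [G, Finset.sum_range_succ] at *
    exact ih.add (h.pow k)

theorem G_even (x : Int) (q : Nat) : G x (2 * q) = (x + 1) * G (x * x) q := by
  induction q with
  | zero => simp [G]
  | succ k ih =>
    have h2 : 2 * (k + 1) = (2 * k) + 1 + 1 := by ring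
    simp only [G, h2, Finset.sum_range_succ] at *
    rw [ih]
    ring

theorem G_odd (x : Int) (q : Nat) : G x (2 * q + 1) = (x + 1) * G (x * x) q + x ^ (2 * q) := by
  have : G x (2 * q + 1) = G x (2 * q) + x ^ (2 * q) := by
    simp [G, Finset.sum_range_succ]
  rw [this, G_even]

-- loop invariant: the loop computes the affine map  x ↦ ca^m · x + (rc·ca^m + cc·G ca m),  mod 2^32
theorem loop_spec : ∀ m : Nat, ∀ n ca cc ra rc : Int, n.toNat = m →
    (jump_lcg_loop n ca cc ra rc).1 ≡ ra * ca ^ m [ZMOD 4294967296] ∧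
    (jump_lcg_loop n ca cc ra rc).2 ≡ rc * ca ^ m + cc * G ca m [ZMOD 4294967296] := by
  intro m
  induction m using Nat.strong_induction_on with
  | _ m ih =>
    intro n ca cc ra rc hm
    by_cases h : 0 < n
    · have hm1 : 1 ≤ m := by omega
      have hq : (n >>> (1:Nat)).toNat = m / 2 := by
        simp only [Int.shiftRight_eq_div_pow, pow_one]
        omega
      have hb : PySem.Int.band n 1 = n % 2 := by
        rw [PySem.Int.band_one, PySem.Int.mod_eq_emod_of_pos (by norm_num)]
      rw [jump_lcg_loop.eq_def, dif_pos h]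
      set q := m / 2 with hqdef
      have ihq := ih q (by omega) (n >>> (1:Nat))
        (PySem.Int.band (ca * ca) 4294967295)
        (PySem.Int.band (cc * ca + cc) 4294967295)
      have hca := band_modeq (ca * ca)
      have hcc := band_modeq (cc * ca + cc)
      by_cases hbit : n % 2 = 1
      · have hmodd : m = 2 * q + 1 := by omega
        simp only [hb, hbit, ne_eq, one_ne_zero, not_false_eq_true, if_true]
        obtain ⟨h1, h2⟩ := ihq (PySem.Int.band (ra * ca) 4294967295)
          (PySem.Int.band (rc * ca + cc) 4294967295) hq
        constructor
        · have step := (band_modeq (ra * ca)).mul (hca.pow q)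
          rw [show ra * ca * (ca * ca) ^ q = ra * ca ^ m from by rw [hmodd]; ring] at step
          exact h1.trans step
        · have step := ((band_modeq (rc * ca + cc)).mul (hca.pow q)).add
            ((band_modeq (cc * ca + cc)).mul (G_modeq hca q))
          rw [show (rc * ca + cc) * (ca * ca) ^ q + (cc * ca + cc) * G (ca * ca) q
              = rc * ca ^ m + cc * G ca m from by rw [hmodd, G_odd]; ring] at step
          exact h2.trans step
      · have hmeven : m = 2 * q := by omega
        have hb0 : n % 2 = 0 := by omega
        simp only [hb, hb0, ne_eq, not_true_eq_false, if_false]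
        obtain ⟨h1, h2⟩ := ihq ra rc hq
        constructor
        · have step := (Int.ModEq.refl ra).mul (hca.pow q)
          rw [show ra * (ca * ca) ^ q = ra * ca ^ m from by rw [hmeven]; ring] at step
          exact h1.trans step
        · have step := ((Int.ModEq.refl rc).mul (hca.pow q)).add
            ((band_modeq (cc * ca + cc)).mul (G_modeq hca q))
          rw [show rc * (ca * ca) ^ q + (cc * ca + cc) * G (ca * ca) q
              = rc * ca ^ m + cc * G ca m from by rw [hmeven, G_even]; ring] at step
          exact h2.trans step
    · have hm0 : m = 0 := by omega
      rw [jump_lcg_loop.eq_def, dif_neg h]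
      subst hm0
      constructor
      · simp
      · simp [G]

-- ===== VERDICT (by name: the statement is the Claim_ definition above) =====
theorem jump_lcg_spec : Claim_equal_jump_lcg := by
  intro seed n _
  unfold Spec_jump_lcg jump_lcg jump_lcg_alt
  by_cases h : n ≤ 0
  · rw [if_pos h, jump_lcg_loop.eq_def, dif_neg (by omega)]
    rw [band_mask, band_mask]
    norm_num
  · rw [if_neg h]
    simp only [band_mask]
    rw [PySem.Int.powMod_eq_emod _ _ (show (0:Int) < 4294967296 by norm_num),
        PySem.Int.powMod_eq_emod _ _ (show (0:Int) < (1664525 - 1) * 4294967296 by norm_num),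
        PySem.Int.floordiv_eq_ediv_of_pos (show (0:Int) < 1664525 - 1 by norm_num)]
    obtain ⟨h1, h2⟩ := loop_spec n.toNat n 1664525 1013904223 1 0 rfl
    set m := n.toNat with hm
    set t := (1664525:Int) ^ m / ((1664525 - 1) * 4294967296) with ht
    have hgeo : (1664525:Int) ^ m - 1 = (1664525 - 1) * G 1664525 m := by
      have hg := geom_sum_mul (1664525:Int) m
      rw [G]
      linear_combination -hg
    have hK : (1664525:Int) ^ m % ((1664525 - 1) * 4294967296) - 1
        = (1664525 - 1) * (G 1664525 m - 4294967296 * t) := by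
      rw [Int.emod_def, ← ht]
      linear_combination hgeo
    rw [hK, Int.mul_ediv_cancel_left _ (show (1664525 - 1:Int) ≠ 0 by norm_num)]
    have hL := (h1.mul (Int.ModEq.refl seed)).add h2
    rw [show ((1:Int) * 1664525 ^ m) * seed + ((0:Int) * 1664525 ^ m + 1013904223 * G 1664525 m)
        = 1664525 ^ m * seed + 1013904223 * G 1664525 m from by ring] at hL
    have e1 : (1664525:Int) ^ m % 4294967296 ≡ 1664525 ^ m [ZMOD 4294967296] :=
      Int.emod_emod_of_dvd _ dvd_rfl
    have e2 : (4294967296:Int) * t ≡ 0 [ZMOD 4294967296] := by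
      unfold Int.ModEq
      simp [Int.mul_emod_right]
    have hR := (e1.mul (Int.ModEq.refl seed)).add
      ((Int.ModEq.refl (1013904223:Int)).mul ((Int.ModEq.refl (G 1664525 m)).sub e2))
    rw [show (1664525:Int) ^ m * seed + 1013904223 * (G 1664525 m - 0)
        = 1664525 ^ m * seed + 1013904223 * G 1664525 m from by ring] at hR
    exact hL.trans hR.symm
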